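-- pv_equiv track=rewrite | github.com/L183R/POKEMONHEROES | Untitled-1.py | rank_letters
-- ===== SOURCE A (Python) =====
-- from collections import Counter
--
-- def rank_letters(candidates: list[str], used_letters: set[str]) -> list[tuple[str, int]]:
--     counter = Counter()
--     for w in candidates:
--         letters = {ch for ch in w.upper() if "A" <= ch <= "Z"}
--         for ch in letters:
--             if ch not in used_letters:
--                 counter[ch] += 1
--     return sorted(counter.items(), key=lambda x: (-x[1], x[0]))
-- ===== SOURCE B (Python) =====
-- def rank_letters(candidates: list[str], used_letters: set[str]) -> list[tuple[str, int]]: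
--     word_sets = [{ch for ch in w.upper() if "A" <= ch <= "Z"} for w in candidates]
--     out = []
--     for i in range(26):
--         ch = chr(65 + i)
--         if ch not in used_letters:
--             n = sum(1 for s in word_sets if ch in s)
--             if n > 0:
--                 out.append((ch, n))
--     return sorted(out, key=lambda x: (-x[1], x[0]))
-- ===== Notes on version B (the rewrite author's own statement) =====
-- stated objective: alternative
-- what changed: Replaces the word-driven Counter accumulation by an alphabet-driven scan: per-word distinct-letter sets are built once, then each unused letter A-Z is counted by membership over that index, keeping only positive counts before the same (-count, letter) sort.
import Mathlib
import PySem

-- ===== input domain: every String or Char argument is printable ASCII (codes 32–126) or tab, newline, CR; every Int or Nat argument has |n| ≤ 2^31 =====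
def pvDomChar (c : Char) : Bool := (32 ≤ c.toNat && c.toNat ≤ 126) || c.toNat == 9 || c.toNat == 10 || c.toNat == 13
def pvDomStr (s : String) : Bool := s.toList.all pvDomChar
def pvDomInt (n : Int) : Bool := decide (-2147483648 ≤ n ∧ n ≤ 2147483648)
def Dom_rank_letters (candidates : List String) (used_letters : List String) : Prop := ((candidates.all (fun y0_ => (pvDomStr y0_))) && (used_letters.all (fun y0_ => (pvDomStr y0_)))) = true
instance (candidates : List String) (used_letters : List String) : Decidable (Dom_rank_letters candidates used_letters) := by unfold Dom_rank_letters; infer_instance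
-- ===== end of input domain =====

-- B replaces A's word-driven Counter accumulation by an alphabet-driven scan over prebuilt
-- per-word letter sets (alternative decomposition, same exact result).

-- ===== PORT A =====
-- {ch for ch in w.upper() if "A" <= ch <= "Z"} — the comparison "A" <= ch <= "Z" on a
-- one-character string is exactly the character comparison 'A' ≤ ch ≤ 'Z' used here.
def letterSet (w : String) : PySem.Set String :=
  PySem.Set.ofList (((PySem.Str.upper w).toList.filter
    (fun ch => decide ('A' ≤ ch) && decide (ch ≤ 'Z'))).map (fun ch => String.mk [ch]))

def rank_letters (candidates : List String) (used_letters : List String) : List (String × Int) :=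
  let counter : PySem.Dict String Int :=
    candidates.foldl (fun counter w =>
      (letterSet w).foldl (fun counter ch =>
        if ch ∉ used_letters then counter.modify ch 0 (· + 1) else counter) counter)
      PySem.Dict.empty
  PySem.List.sorted2 counter.items (fun x => -x.2) (fun x => x.1)

-- ===== PORT B =====
def rank_letters_alt (candidates : List String) (used_letters : List String) : List (String × Int) :=
  let wordSets : List (PySem.Set String) := candidates.map letterSet
  let out : List (String × Int) :=
    (List.range 26).foldl (fun out i =>
      let ch := String.mk [Char.ofNat (65 + i)]
      if ch ∉ used_letters then
        let n : Int := (wordSets.countP (fun s => s.contains ch) : Int)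
        if n > 0 then out ++ [(ch, n)] else out
      else out) []
  PySem.List.sorted2 out (fun x => -x.2) (fun x => x.1)

-- ===== PRECONDITION & SPEC =====
def Spec_rank_letters (candidates : List String) (used_letters : List String) (out : List (String × Int)) : Prop := out = rank_letters_alt candidates used_letters
instance (candidates : List String) (used_letters : List String) (out : List (String × Int)) : Decidable (Spec_rank_letters candidates used_letters out) := by unfold Spec_rank_letters; infer_instance

-- ===== CLAIM (what is proved, stated in full; the proofs are below) =====
def Claim_equal_rank_letters : Prop := ∀ (candidates : List String) (used_letters : List String), Dom_rank_letters candidates used_letters → Spec_rank_letters candidates used_letters (rank_letters candidates used_letters)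

-- ===== LEMMAS AND PROOFS =====

-- the common sort key, as one linearly ordered (lexicographic) key
def pvKey (x : String × Int) : Lex (Int × String) := toLex (-x.2, x.1)

-- all letter occurrences A counts (one per word and distinct unused letter)
def pvL (candidates : List String) (used_letters : List String) : List String :=
  candidates.flatMap (fun w => (letterSet w).filter (fun ch => decide (ch ∉ used_letters)))

-- B's count of a letter
def pvCnt (candidates : List String) (ch : String) : Nat :=
  candidates.countP (fun w => (letterSet w).contains ch)

def pvMk (i : Nat) : String := String.mk [Char.ofNat (65 + i)]

def pvAlpha : List String := (List.range 26).map pvMk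

lemma pvKey_injective : Function.Injective pvKey := by
  intro a b h
  unfold pvKey at h
  have h' : ((-a.2 : Int), a.1) = ((-b.2 : Int), b.1) := h
  have h1 := congrArg Prod.fst h'
  have h2 := congrArg Prod.snd h'
  simp at h1 h2
  exact Prod.ext h2 h1

lemma sorted2_eq_sorted (xs : List (String × Int)) :
    PySem.List.sorted2 xs (fun x => -x.2) (fun x => x.1) = PySem.List.sorted xs pvKey := by
  rw [PySem.List.sorted_eq_foldl_insertBy]
  show List.foldl _ [] xs = _
  congr 1
  funext acc x
  congr 1
  funext a b
  by_cases h1 : (-a.2 : Int) < -b.2 <;> by_cases h2 : (-b.2 : Int) < -a.2 <;>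
    by_cases h3 : a.1 < b.1 <;>
    simp [h1, h2, h3, pvKey, Prod.Lex.lt_iff] <;> omega

-- A's dict is Counter(pvL)
lemma counter_fold_eq (candidates used_letters : List String) :
    candidates.foldl (fun counter w =>
      (letterSet w).foldl (fun counter ch =>
        if ch ∉ used_letters then counter.modify ch 0 (· + 1) else counter) counter)
      PySem.Dict.empty = PySem.Dict.counter (pvL candidates used_letters) := by
  rw [PySem.Dict.counter_eq_foldl, pvL, List.foldl_flatMap]
  apply PySem.List.foldl_congr_mem
  intro acc w _
  rw [PySem.List.foldl_ite_eq_foldl_filter (p := fun ch => ch ∉ used_letters)]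

lemma count_pvL (candidates used_letters : List String) (ch : String) (hus : ch ∉ used_letters) :
    (pvL candidates used_letters).count ch = pvCnt candidates ch := by
  induction candidates with
  | nil => simp [pvL, pvCnt]
  | cons w cs ih =>
    rw [pvL, List.flatMap_cons, List.count_append, pvCnt, List.countP_cons]
    rw [pvL] at ih; rw [pvCnt] at ih
    rw [ih]
    by_cases hm : ch ∈ letterSet w
    · have hmem : ch ∈ (letterSet w).filter (fun ch => decide (ch ∉ used_letters)) := by
        simp [List.mem_filter, hm, hus]
      have hnd : ((letterSet w).filter (fun ch => decide (ch ∉ used_letters))).Nodup :=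
        (PySem.Set.nodup_ofList _).filter _
      rw [List.count_eq_one_of_mem hnd hmem]
      simp [hm]
      omega
    · have hnmem : ch ∉ (letterSet w).filter (fun ch => decide (ch ∉ used_letters)) := by
        simp [List.mem_filter]; intro h; exact absurd h hm
      rw [List.count_eq_zero_of_not_mem hnmem]
      simp [hm]

lemma mem_letterSet_alpha {ch : String} {w : String} (h : ch ∈ letterSet w) : ch ∈ pvAlpha := by
  rw [letterSet, PySem.Set.mem_ofList] at h
  obtain ⟨c, hc, rfl⟩ := List.mem_map.mp h
  have hcf := (List.mem_filter.mp hc).2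
  simp at hcf
  obtain ⟨hA, hZ⟩ := hcf
  have h65 : 65 ≤ c.toNat := hA
  have h90 : c.toNat ≤ 90 := hZ
  rw [pvAlpha]
  apply List.mem_map.mpr
  refine ⟨c.toNat - 65, ?_, ?_⟩
  · simp [List.mem_range]; omega
  · rw [pvMk]
    have : 65 + (c.toNat - 65) = c.toNat := by omega
    rw [this, Char.ofNat_toNat]

lemma mem_pvL_iff (candidates used_letters : List String) (ch : String) :
    ch ∈ pvL candidates used_letters ↔
      ch ∈ pvAlpha ∧ ch ∉ used_letters ∧ 0 < pvCnt candidates ch := by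
  constructor
  · intro h
    rw [pvL] at h
    obtain ⟨w, hw, hmem⟩ := List.mem_flatMap.mp h
    have hf := List.mem_filter.mp hmem
    have hm : ch ∈ letterSet w := hf.1
    have hus : ch ∉ used_letters := by simpa using hf.2
    refine ⟨mem_letterSet_alpha hm, hus, ?_⟩
    rw [pvCnt]
    apply List.countP_pos_iff.mpr
    exact ⟨w, hw, (PySem.Set.contains_iff _ _).mpr hm⟩
  · rintro ⟨_, hus, hpos⟩
    rw [pvCnt] at hpos
    obtain ⟨w, hw, hc⟩ := List.countP_pos_iff.mp hpos
    rw [pvL]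
    apply List.mem_flatMap.mpr
    refine ⟨w, hw, ?_⟩
    rw [List.mem_filter]
    exact ⟨(PySem.Set.contains_iff _ _).mp hc, by simpa using hus⟩

-- ===== VERDICT (by name: the statement is the Claim_ definition above) =====
theorem rank_letters_spec : Claim_equal_rank_letters := by
  intro cs us _
  show rank_letters cs us = rank_letters_alt cs us
  rw [rank_letters, rank_letters_alt]
  simp only []
  rw [sorted2_eq_sorted, sorted2_eq_sorted, counter_fold_eq, PySem.Dict.items_counter]
  -- normalise B's fold
  have hB : (List.range 26).foldl (fun out i =>
      let ch := String.mk [Char.ofNat (65 + i)]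
      if ch ∉ us then
        let n : Int := ((cs.map letterSet).countP (fun s => s.contains ch) : Int)
        if n > 0 then out ++ [(ch, n)] else out
      else out) ([] : List (String × Int))
      = ((List.range 26).filter
          (fun i => decide (pvMk i ∉ us ∧ 0 < pvCnt cs (pvMk i)))).map
          (fun i => (pvMk i, (pvCnt cs (pvMk i) : Int))) := by
    have hcnt : ∀ ch, (cs.map letterSet).countP (fun s => s.contains ch) = pvCnt cs ch := by
      intro ch; rw [List.countP_map]; rfl
    rw [show (fun (out : List (String × Int)) (i : Nat) =>
        let ch := String.mk [Char.ofNat (65 + i)]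
        if ch ∉ us then
          let n : Int := ((cs.map letterSet).countP (fun s => s.contains ch) : Int)
          if n > 0 then out ++ [(ch, n)] else out
        else out)
      = (fun out i => if (pvMk i ∉ us ∧ 0 < pvCnt cs (pvMk i)) then
            out ++ [(pvMk i, (pvCnt cs (pvMk i) : Int))] else out) from ?_]
    · rw [PySem.List.foldl_append_ite (p := fun i => pvMk i ∉ us ∧ 0 < pvCnt cs (pvMk i)),
          List.nil_append]
    · funext out i
      simp only [pvMk, hcnt]
      by_cases h1 : String.mk [Char.ofNat (65 + i)] ∉ us <;>
        by_cases h2 : 0 < pvCnt cs (String.mk [Char.ofNat (65 + i)]) <;>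
        simp [h1, h2]
  rw [hB]
  -- both sides are sorted maps of key lists with the same count function
  have hfact : ((List.range 26).filter
        (fun i => decide (pvMk i ∉ us ∧ 0 < pvCnt cs (pvMk i)))).map
        (fun i => (pvMk i, (pvCnt cs (pvMk i) : Int)))
      = (((List.range 26).filter
          (fun i => decide (pvMk i ∉ us ∧ 0 < pvCnt cs (pvMk i)))).map pvMk).map
          (fun ch => (ch, (pvCnt cs ch : Int))) := by
    rw [List.map_map]; rfl
  rw [hfact]
  have hAmap : (PySem.Set.ofList (pvL cs us)).map (fun k => (k, ((pvL cs us).count k : Int)))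
      = (PySem.Set.ofList (pvL cs us)).map (fun ch => (ch, (pvCnt cs ch : Int))) := by
    apply List.map_congr_left
    intro k hk
    have hk' : k ∈ pvL cs us := (PySem.Set.mem_ofList _ _).mp hk
    have hus : k ∉ us := ((mem_pvL_iff cs us k).mp hk').2.1
    rw [count_pvL cs us k hus]
  rw [hAmap]
  -- key lists are permutations of each other
  have hndA : (PySem.Set.ofList (pvL cs us)).Nodup := PySem.Set.nodup_ofList _
  have hndB : (((List.range 26).filter
      (fun i => decide (pvMk i ∉ us ∧ 0 < pvCnt cs (pvMk i)))).map pvMk).Nodup := by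
    have hsub : ((List.range 26).filter
        (fun i => decide (pvMk i ∉ us ∧ 0 < pvCnt cs (pvMk i)))).map pvMk |>.Sublist pvAlpha := by
      rw [pvAlpha]
      exact ((List.range 26).filter_sublist).map pvMk
    exact hsub.nodup (by rw [pvAlpha]; decide)
  have hperm : (PySem.Set.ofList (pvL cs us)).Perm
      (((List.range 26).filter
        (fun i => decide (pvMk i ∉ us ∧ 0 < pvCnt cs (pvMk i)))).map pvMk) := by
    rw [List.perm_ext_iff_of_nodup hndA hndB]
    intro ch
    rw [PySem.Set.mem_ofList, mem_pvL_iff]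
    constructor
    · rintro ⟨ha, hus, hpos⟩
      rw [pvAlpha] at ha
      obtain ⟨i, hi, rfl⟩ := List.mem_map.mp ha
      apply List.mem_map.mpr
      exact ⟨i, List.mem_filter.mpr ⟨hi, by simp [hus, hpos]⟩, rfl⟩
    · intro h
      obtain ⟨i, hi, rfl⟩ := List.mem_map.mp h
      have hf := List.mem_filter.mp hi
      have hq := hf.2
      simp at hq
      refine ⟨List.mem_map.mpr ⟨i, hf.1, rfl⟩, hq.1, hq.2⟩
  exact PySem.List.sorted_eq_sorted_of_perm _ _ pvKey pvKey_injective (hperm.map _)
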